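-- pv_equiv track=rewrite | github.com/bredsky212/Logiq212 | cogs/ai_chat.py | _trim_messages
-- ===== SOURCE A (Python) =====
-- from typing import Any, Dict, List, Optional, Tuple
--
-- def _trim_messages(messages: List[Dict[str, Any]], max_turns: int) -> List[Dict[str, Any]]:
--     if max_turns <= 0:
--         return []
--     trimmed: List[Dict[str, Any]] = []
--     user_turns = 0
--     for msg in reversed(messages):
--         if msg.get("role") == "user":
--             user_turns += 1
--         trimmed.append(msg)
--         if user_turns >= max_turns:
--             break
--     return list(reversed(trimmed))
-- ===== SOURCE B (Python) =====
-- from typing import Any, Dict, List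
--
--
-- def _trim_messages(messages: List[Dict[str, Any]], max_turns: int) -> List[Dict[str, Any]]:
--     if max_turns <= 0:
--         return []
--     user_idx = [i for i, m in enumerate(messages) if m.get("role") == "user"]
--     if len(user_idx) < max_turns:
--         return list(messages)
--     return messages[user_idx[-max_turns]:]
-- ===== Notes on version B (the rewrite author's own statement) =====
-- stated objective: alternative
-- what changed: Replaces A's reverse-iteration accumulate-and-break loop (building the kept list back-to-front and reversing it) with a forward scan that builds an index table of user-message positions and returns a single tail slice messages[user_idx[-max_turns]:].
import Mathlib
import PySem

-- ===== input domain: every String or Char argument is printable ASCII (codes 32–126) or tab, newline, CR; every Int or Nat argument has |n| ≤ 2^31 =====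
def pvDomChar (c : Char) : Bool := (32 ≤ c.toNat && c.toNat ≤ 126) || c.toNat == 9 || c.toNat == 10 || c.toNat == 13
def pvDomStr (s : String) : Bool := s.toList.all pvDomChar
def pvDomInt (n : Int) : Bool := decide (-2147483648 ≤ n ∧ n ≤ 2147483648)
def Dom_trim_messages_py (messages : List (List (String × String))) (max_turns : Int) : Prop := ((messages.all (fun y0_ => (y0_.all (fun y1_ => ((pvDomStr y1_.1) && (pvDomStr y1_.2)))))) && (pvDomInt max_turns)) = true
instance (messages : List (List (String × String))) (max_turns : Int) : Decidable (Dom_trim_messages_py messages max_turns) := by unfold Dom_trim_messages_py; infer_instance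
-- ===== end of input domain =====

-- B replaces A's reverse-iteration accumulate-and-break loop with a forward scan that
-- indexes the user-message positions and returns a single tail slice (alternative decomposition, same cost).

-- msg.get("role") == "user"  (dict = assoc list, lookup = first match)
def isUserMsg_py (m : List (String × String)) : Bool := m.lookup "role" == some "user"

-- ===== PORT A =====
def trimLoopA (max_turns : Int) : List (List (String × String)) → Int → List (List (String × String)) → List (List (String × String))
  | [], _, trimmed => trimmed.reverse
  | msg :: rest, user_turns, trimmed =>
    let ut := if isUserMsg_py msg then user_turns + 1 else user_turns
    let tr := trimmed ++ [msg]
    if max_turns ≤ ut then tr.reverse else trimLoopA max_turns rest ut tr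

def trim_messages_py (messages : List (List (String × String))) (max_turns : Int) : List (List (String × String)) :=
  if max_turns ≤ 0 then [] else trimLoopA max_turns messages.reverse 0 []

-- ===== PORT B =====
def trim_messages_py_alt (messages : List (List (String × String))) (max_turns : Int) : List (List (String × String)) :=
  if max_turns ≤ 0 then []
  else
    let user_idx := ((PySem.List.enumerate messages 0).filter (fun p => isUserMsg_py p.2)).map Prod.fst
    if (user_idx.length : Int) < max_turns then messages
    else PySem.List.slice messages (some (PySem.List.pyGetD user_idx (-max_turns) 0)) none

-- ===== PRECONDITION & SPEC =====
def Spec_trim_messages_py (messages : List (List (String × String))) (max_turns : Int) (out : List (List (String × String))) : Prop := out = trim_messages_py_alt messages max_turns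
instance (messages : List (List (String × String))) (max_turns : Int) (out : List (List (String × String))) : Decidable (Spec_trim_messages_py messages max_turns out) := by unfold Spec_trim_messages_py; infer_instance

-- ===== CLAIM (what is proved, stated in full; the proofs are below) =====
def Claim_equal_trim_messages_py : Prop := ∀ (messages : List (List (String × String))) (max_turns : Int), Dom_trim_messages_py messages max_turns → Spec_trim_messages_py messages max_turns (trim_messages_py messages max_turns)

-- ===== LEMMAS AND PROOFS =====

-- the shortest prefix of r containing n user messages (or all of r)
def keepPrefix : Nat → List (List (String × String)) → List (List (String × String))
  | _, [] => []
  | n, m :: rest =>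
    m :: (if isUserMsg_py m then (if n ≤ 1 then [] else keepPrefix (n - 1) rest) else keepPrefix n rest)

-- B's index table
def uidx (l : List (List (String × String))) : List Int :=
  ((PySem.List.enumerate l 0).filter (fun p => isUserMsg_py p.2)).map Prod.fst

theorem trimLoopA_eq_keepPrefix (mt : Int) (r : List (List (String × String))) :
    ∀ (t : Int) (acc : List (List (String × String))), t < mt →
    trimLoopA mt r t acc = (acc ++ keepPrefix (mt - t).toNat r).reverse := by
  induction r with
  | nil => intro t acc ht; simp [trimLoopA, keepPrefix]
  | cons m rest ih =>
    intro t acc ht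
    by_cases hu : isUserMsg_py m
    · by_cases hstop : mt ≤ t + 1
      · have h1 : (mt - t).toNat = 1 := by omega
        simp [trimLoopA, hu, hstop, keepPrefix, h1]
      · have h2 : (mt - (t + 1)).toNat = (mt - t).toNat - 1 := by omega
        have hle : ¬ (mt - t).toNat ≤ 1 := by omega
        simp only [trimLoopA, if_pos hu, if_neg hstop]
        rw [ih (t + 1) (acc ++ [m]) (by omega)]
        simp [keepPrefix, hu, hle, h2]
    · have hstop : ¬ mt ≤ t := by omega
      simp only [trimLoopA, if_neg hu, if_neg hstop]
      rw [ih t (acc ++ [m]) ht]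
      simp [keepPrefix, hu]

theorem uidx_append_singleton (l : List (List (String × String))) (a : List (String × String)) :
    uidx (l ++ [a]) = uidx l ++ (if isUserMsg_py a then [(l.length : Int)] else []) := by
  unfold uidx
  rw [PySem.List.enumerate_append]
  simp [PySem.List.enumerate_cons, PySem.List.enumerate_nil, List.filter_append]
  by_cases h : isUserMsg_py a <;> simp [h]

theorem mem_uidx_bounds (l : List (List (String × String))) (i : Int) (h : i ∈ uidx l) :
    0 ≤ i ∧ i < (l.length : Int) := by
  unfold uidx at h
  rcases List.mem_map.mp h with ⟨p, hp, rfl⟩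
  have hp' := List.mem_filter.mp hp |>.1
  rcases (PySem.List.mem_enumerate_iff _ _ _).mp hp' with ⟨k, hk, rfl⟩
  simp; omega

theorem main_uidx_keep (l : List (List (String × String))) :
    ∀ n : Nat, 1 ≤ n →
    (if (uidx l).length < n then l
     else l.drop ((uidx l).getD ((uidx l).length - n) 0).toNat)
    = (keepPrefix n l.reverse).reverse := by
  induction l using List.reverseRecOn with
  | nil => intro n hn; simp [uidx, PySem.List.enumerate_nil, keepPrefix]
  | append_singleton l a ih =>
    intro n hn
    rw [uidx_append_singleton]
    by_cases hu : isUserMsg_py a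
    · simp only [if_pos hu, List.reverse_append, List.reverse_singleton, List.singleton_append,
        keepPrefix, List.length_append, List.length_singleton]
      by_cases h1 : n ≤ 1
      · have hn1 : n = 1 := by omega
        subst hn1
        have hlen : ¬ (uidx l).length + 1 < 1 := by omega
        rw [if_neg hlen]
        have hidx : (uidx l ++ [(l.length : Int)]).getD ((uidx l).length + 1 - 1) 0 = (l.length : Int) := by
          simp
        rw [hidx]
        simp
      · have hn2 : 2 ≤ n := by omega
        simp only [if_neg h1]
        rw [List.reverse_cons]
        by_cases hlt : (uidx l).length < n - 1
        · have hlt' : (uidx l).length + 1 < n := by omega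
          rw [if_pos hlt']
          have := ih (n - 1) (by omega)
          rw [if_pos hlt] at this
          rw [← this]
        · have hlt' : ¬ (uidx l).length + 1 < n := by omega
          rw [if_neg hlt']
          have := ih (n - 1) (by omega)
          rw [if_neg hlt] at this
          have hjlt : (uidx l).length + 1 - n < (uidx l).length := by omega
          have hidx : (uidx l ++ [(l.length : Int)]).getD ((uidx l).length + 1 - n) 0
              = (uidx l).getD ((uidx l).length + 1 - n) 0 := by
            rw [List.getD_append _ _ _ _ hjlt]
          rw [hidx]
          have hj : (uidx l).length + 1 - n = (uidx l).length - (n - 1) := by omega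
          rw [hj]
          set s := (uidx l).getD ((uidx l).length - (n - 1)) 0 with hs
          have hmem : s ∈ uidx l := by
            rw [hs, List.getD_eq_getElem _ _ (by omega)]
            exact List.getElem_mem _
          have hb := mem_uidx_bounds l s hmem
          rw [List.drop_append_of_le_length (by omega)]
          rw [← this]
    · simp only [if_neg hu, List.append_nil, List.reverse_append, List.reverse_singleton,
        List.singleton_append, keepPrefix]
      rw [List.reverse_cons]
      by_cases hlt : (uidx l).length < n
      · rw [if_pos hlt]
        have := ih n hn
        rw [if_pos hlt] at this
        rw [← this]
      · rw [if_neg hlt]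
        have := ih n hn
        rw [if_neg hlt] at this
        set s := (uidx l).getD ((uidx l).length - n) 0 with hs
        have hmem : s ∈ uidx l := by
          rw [hs, List.getD_eq_getElem _ _ (by omega)]
          exact List.getElem_mem _
        have hb := mem_uidx_bounds l s hmem
        rw [List.drop_append_of_le_length (by omega)]
        rw [← this]

-- ===== VERDICT (by name: the statement is the Claim_ definition above) =====
theorem trim_messages_py_spec : Claim_equal_trim_messages_py := by
  intro messages mt _
  unfold Spec_trim_messages_py trim_messages_py trim_messages_py_alt
  by_cases hmt : mt ≤ 0
  · simp [hmt]
  · simp only [if_neg hmt]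
    obtain ⟨n, rfl⟩ : ∃ n : Nat, mt = (n : Int) := ⟨mt.toNat, by omega⟩
    have hn1 : 1 ≤ n := by omega
    have hA : trimLoopA (n : Int) messages.reverse 0 [] = (keepPrefix n messages.reverse).reverse := by
      rw [trimLoopA_eq_keepPrefix (n : Int) messages.reverse 0 [] (by omega)]
      simp
    rw [hA]
    have hmain := main_uidx_keep messages n hn1
    show (keepPrefix n messages.reverse).reverse =
      (if ((uidx messages).length : Int) < (n : Int) then messages
       else PySem.List.slice messages (some (PySem.List.pyGetD (uidx messages) (-(n : Int)) 0)) none)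
    rw [← hmain]
    by_cases hlt : (uidx messages).length < n
    · rw [if_pos hlt, if_pos (by exact_mod_cast hlt)]
    · rw [if_neg hlt, if_neg (by omega)]
      have hnlen : n ≤ (uidx messages).length := by omega
      rw [PySem.List.pyGetD_neg_natCast _ _ _ (by omega) hnlen]
      have hmem : (uidx messages)[(uidx messages).length - n] ∈ uidx messages := List.getElem_mem _
      have hb := mem_uidx_bounds messages _ hmem
      rw [PySem.List.slice_from _ (by omega)]
      congr 1
      rw [List.getD_eq_getElem _ _ (by omega)]
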